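-- pv_equiv track=rewrite | github.com/tomasb01/AI_Scout | aiscout/engine/enrichment.py | _deduplicate_tech_stack
-- ===== SOURCE A (Python) =====
-- _MODEL_SUPPRESSES_PROVIDER = {
--     "OpenAI": {"GPT-3", "GPT-3.5", "GPT-4", "GPT-4o", "GPT-4 Turbo", "OpenAI o1", "OpenAI o3", "OpenAI o4", "DALL-E", "Whisper", "OpenAI TTS", "OpenAI Embeddings"},
--     "Anthropic (Claude)": {"Claude 2", "Claude 3", "Claude 3.5", "Claude 4"},
--     "Google AI (Gemini)": {"Gemini 1.5", "Gemini 2", "Gemini Pro", "Gemini Flash"},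
--     "Mistral AI": {"Mistral Large", "Mistral Small", "Mistral Medium", "Codestral", "Mixtral"},
--     "Cohere": {"Cohere Command R", "Cohere Command"},
-- }
--
-- _SPECIFIC_SUPPRESSES_GENERIC = {
--     "Llama": {"Llama 2", "Llama 3"},
--     "Llama 2": {"Llama 3"},
--     "Qwen": {"Qwen 2"},
--     "GPT-3": {"GPT-3.5", "GPT-4", "GPT-4o", "GPT-4 Turbo"},
--     "GPT-3.5": {"GPT-4", "GPT-4o", "GPT-4 Turbo"},
--     "GPT-4": {"GPT-4o", "GPT-4 Turbo"},
--     "Claude 2": {"Claude 3", "Claude 3.5", "Claude 4"},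
--     "Claude 3": {"Claude 3.5", "Claude 4"},
--     "Gemini 1.5": {"Gemini 2"},
-- }
--
-- def _deduplicate_tech_stack(stack: set[str]) -> set[str]:
--     """Remove redundant entries from tech stack.
--
--     Rules:
--     - If a specific model is present, remove the generic provider
--       (e.g. "GPT-4o" present → remove "OpenAI")
--     - If a versioned model is present, remove the unversioned
--       (e.g. "Llama 3" present → remove "Llama")
--     """
--     to_remove = set()
--
--     # Provider suppression by specific models
--     for provider, models in _MODEL_SUPPRESSES_PROVIDER.items():
--         if provider in stack and stack & models:
--             to_remove.add(provider)
--
--     # Generic suppression by specific versions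
--     for generic, specifics in _SPECIFIC_SUPPRESSES_GENERIC.items():
--         if generic in stack and stack & specifics:
--             to_remove.add(generic)
--
--     return stack - to_remove
-- ===== SOURCE B (Python) =====
-- # One literal inverted suppression table (suppressor token -> everything it makes
-- # redundant), written out once; the per-call work is a single pass over the stack.
-- _SUPPRESSED_BY = {
--     "Claude 2": {"Anthropic (Claude)"},
--     "Claude 3": {"Anthropic (Claude)", "Claude 2"},
--     "Claude 3.5": {"Anthropic (Claude)", "Claude 2", "Claude 3"},
--     "Claude 4": {"Anthropic (Claude)", "Claude 2", "Claude 3"},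
--     "Codestral": {"Mistral AI"},
--     "Cohere Command": {"Cohere"},
--     "Cohere Command R": {"Cohere"},
--     "DALL-E": {"OpenAI"},
--     "GPT-3": {"OpenAI"},
--     "GPT-3.5": {"OpenAI", "GPT-3"},
--     "GPT-4": {"OpenAI", "GPT-3", "GPT-3.5"},
--     "GPT-4 Turbo": {"OpenAI", "GPT-3", "GPT-3.5", "GPT-4"},
--     "GPT-4o": {"OpenAI", "GPT-3", "GPT-3.5", "GPT-4"},
--     "Gemini 1.5": {"Google AI (Gemini)"},
--     "Gemini 2": {"Google AI (Gemini)", "Gemini 1.5"},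
--     "Gemini Flash": {"Google AI (Gemini)"},
--     "Gemini Pro": {"Google AI (Gemini)"},
--     "Llama 2": {"Llama"},
--     "Llama 3": {"Llama", "Llama 2"},
--     "Mistral Large": {"Mistral AI"},
--     "Mistral Medium": {"Mistral AI"},
--     "Mistral Small": {"Mistral AI"},
--     "Mixtral": {"Mistral AI"},
--     "OpenAI Embeddings": {"OpenAI"},
--     "OpenAI TTS": {"OpenAI"},
--     "OpenAI o1": {"OpenAI"},
--     "OpenAI o3": {"OpenAI"},
--     "OpenAI o4": {"OpenAI"},
--     "Qwen 2": {"Qwen"},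
--     "Whisper": {"OpenAI"},
-- }
--
--
-- def _deduplicate_tech_stack(stack: set[str]) -> set[str]:
--     """Remove redundant entries from tech stack.
--
--     Single pass over the stack: each present token contributes the set of
--     tokens it suppresses; the final set difference removes only those
--     actually present, so no presence guard is needed while collecting.
--     """
--     to_remove = set()
--     for item in stack:
--         to_remove |= _SUPPRESSED_BY.get(item, set())
--     return stack - to_remove
-- ===== Notes on version B (the rewrite author's own statement) =====
-- stated objective: alternative
-- what changed: Instead of scanning both forward suppression tables per call and intersecting each victim's suppressor set with the stack, B carries one literal inverted table mapping every suppressor token to the union of all tokens it makes redundant, collects victim sets in a single pass over the stack, and subtracts; presence guards are unneeded since the set difference only removes present items.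
import Mathlib
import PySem

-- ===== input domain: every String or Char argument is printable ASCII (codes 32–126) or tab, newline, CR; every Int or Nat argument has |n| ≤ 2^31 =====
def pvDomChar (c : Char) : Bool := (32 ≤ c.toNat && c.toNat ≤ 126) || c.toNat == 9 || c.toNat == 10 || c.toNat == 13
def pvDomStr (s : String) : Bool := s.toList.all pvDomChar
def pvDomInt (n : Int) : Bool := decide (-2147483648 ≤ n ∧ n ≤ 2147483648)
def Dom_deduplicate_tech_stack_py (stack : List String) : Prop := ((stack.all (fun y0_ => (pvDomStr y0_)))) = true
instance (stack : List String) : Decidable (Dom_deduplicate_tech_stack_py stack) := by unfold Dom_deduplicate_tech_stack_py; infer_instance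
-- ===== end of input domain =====

-- B replaces A's per-call scan of the two forward suppression tables by ONE literal
-- inverted table (suppressor token -> everything it makes redundant) consulted in a
-- single pass over the stack (objective: alternative decomposition / data structure).


-- ===== PORT A =====
-- A's two module-level forward tables, values as Python set literals (distinct elements)
def modelSuppressesProvider : List (String × List String) :=
  [("OpenAI", ["GPT-3", "GPT-3.5", "GPT-4", "GPT-4o", "GPT-4 Turbo", "OpenAI o1", "OpenAI o3", "OpenAI o4", "DALL-E", "Whisper", "OpenAI TTS", "OpenAI Embeddings"]),
   ("Anthropic (Claude)", ["Claude 2", "Claude 3", "Claude 3.5", "Claude 4"]),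
   ("Google AI (Gemini)", ["Gemini 1.5", "Gemini 2", "Gemini Pro", "Gemini Flash"]),
   ("Mistral AI", ["Mistral Large", "Mistral Small", "Mistral Medium", "Codestral", "Mixtral"]),
   ("Cohere", ["Cohere Command R", "Cohere Command"])]

def specificSuppressesGeneric : List (String × List String) :=
  [("Llama", ["Llama 2", "Llama 3"]),
   ("Llama 2", ["Llama 3"]),
   ("Qwen", ["Qwen 2"]),
   ("GPT-3", ["GPT-3.5", "GPT-4", "GPT-4o", "GPT-4 Turbo"]),
   ("GPT-3.5", ["GPT-4", "GPT-4o", "GPT-4 Turbo"]),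
   ("GPT-4", ["GPT-4o", "GPT-4 Turbo"]),
   ("Claude 2", ["Claude 3", "Claude 3.5", "Claude 4"]),
   ("Claude 3", ["Claude 3.5", "Claude 4"]),
   ("Gemini 1.5", ["Gemini 2"])]

-- 'if key in stack and stack & values: to_remove.add(key)', folded over one table
def suppressPass (stack : List String) (tbl : List (String × List String))
    (toRemove : PySem.Set String) : PySem.Set String :=
  tbl.foldl (fun acc kv =>
    if stack.contains kv.1 && kv.2.any (fun m => stack.contains m)
    then PySem.Set.add acc kv.1 else acc) toRemove

def deduplicate_tech_stack_py (stack : List String) : List String :=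
  let toRemove := suppressPass stack modelSuppressesProvider PySem.Set.empty
  let toRemove := suppressPass stack specificSuppressesGeneric toRemove
  PySem.Set.diff stack toRemove

-- ===== PORT B =====
-- B's single literal inverted table: _SUPPRESSED_BY in Source B
def suppressedByTable : List (String × List String) :=
  [("Claude 2", ["Anthropic (Claude)"]),
   ("Claude 3", ["Anthropic (Claude)", "Claude 2"]),
   ("Claude 3.5", ["Anthropic (Claude)", "Claude 2", "Claude 3"]),
   ("Claude 4", ["Anthropic (Claude)", "Claude 2", "Claude 3"]),
   ("Codestral", ["Mistral AI"]),
   ("Cohere Command", ["Cohere"]),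
   ("Cohere Command R", ["Cohere"]),
   ("DALL-E", ["OpenAI"]),
   ("GPT-3", ["OpenAI"]),
   ("GPT-3.5", ["OpenAI", "GPT-3"]),
   ("GPT-4", ["OpenAI", "GPT-3", "GPT-3.5"]),
   ("GPT-4 Turbo", ["OpenAI", "GPT-3", "GPT-3.5", "GPT-4"]),
   ("GPT-4o", ["OpenAI", "GPT-3", "GPT-3.5", "GPT-4"]),
   ("Gemini 1.5", ["Google AI (Gemini)"]),
   ("Gemini 2", ["Google AI (Gemini)", "Gemini 1.5"]),
   ("Gemini Flash", ["Google AI (Gemini)"]),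
   ("Gemini Pro", ["Google AI (Gemini)"]),
   ("Llama 2", ["Llama"]),
   ("Llama 3", ["Llama", "Llama 2"]),
   ("Mistral Large", ["Mistral AI"]),
   ("Mistral Medium", ["Mistral AI"]),
   ("Mistral Small", ["Mistral AI"]),
   ("Mixtral", ["Mistral AI"]),
   ("OpenAI Embeddings", ["OpenAI"]),
   ("OpenAI TTS", ["OpenAI"]),
   ("OpenAI o1", ["OpenAI"]),
   ("OpenAI o3", ["OpenAI"]),
   ("OpenAI o4", ["OpenAI"]),
   ("Qwen 2", ["Qwen"]),
   ("Whisper", ["OpenAI"])]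

-- _SUPPRESSED_BY.get(item, set()) : first-match association lookup, default empty
def dictGet : List (String × List String) → String → List String
  | [], _ => []
  | (k, v) :: rest, x => if x = k then v else dictGet rest x

def deduplicate_tech_stack_py_alt (stack : List String) : List String :=
  let toRemove := stack.foldl
    (fun acc item => PySem.Set.union acc (dictGet suppressedByTable item))
    PySem.Set.empty
  PySem.Set.diff stack toRemove

-- ===== PRECONDITION & SPEC =====
def Spec_deduplicate_tech_stack_py (stack : List String) (out : List String) : Prop := out = deduplicate_tech_stack_py_alt stack
instance (stack : List String) (out : List String) : Decidable (Spec_deduplicate_tech_stack_py stack out) := by unfold Spec_deduplicate_tech_stack_py; infer_instance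

-- ===== CLAIM (what is proved, stated in full; the proofs are below) =====
def Claim_equal_deduplicate_tech_stack_py : Prop := ∀ (stack : List String), Dom_deduplicate_tech_stack_py stack → Spec_deduplicate_tech_stack_py stack (deduplicate_tech_stack_py stack)

-- ===== LEMMAS AND PROOFS =====

-- membership in A's table-scanning fold
theorem mem_suppressPass (stack : List String) (tbl : List (String × List String))
    (acc : PySem.Set String) (y : String) :
    y ∈ suppressPass stack tbl acc ↔
      y ∈ acc ∨ ∃ kv ∈ tbl, y = kv.1 ∧
        (stack.contains kv.1 && kv.2.any (fun m => stack.contains m)) = true := by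
  induction tbl generalizing acc with
  | nil => simp [suppressPass]
  | cons kv rest ih =>
    simp only [suppressPass, List.foldl_cons] at *
    rw [ih]
    by_cases h : (stack.contains kv.1 && kv.2.any (fun m => stack.contains m)) = true
    · rw [if_pos h]
      simp only [PySem.Set.mem_add, List.mem_cons]
      constructor
      · rintro ((h1 | h1) | ⟨kv', h2, h3, h4⟩)
        · exact Or.inl h1
        · exact Or.inr ⟨kv, Or.inl rfl, h1, h⟩
        · exact Or.inr ⟨kv', Or.inr h2, h3, h4⟩
      · rintro (h1 | ⟨kv', (rfl | h2), h3, h4⟩)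
        · exact Or.inl (Or.inl h1)
        · exact Or.inl (Or.inr h3)
        · exact Or.inr ⟨kv', h2, h3, h4⟩
    · rw [if_neg h]
      simp only [List.mem_cons]
      constructor
      · rintro (h1 | ⟨kv', h2, h3, h4⟩)
        · exact Or.inl h1
        · exact Or.inr ⟨kv', Or.inr h2, h3, h4⟩
      · rintro (h1 | ⟨kv', (rfl | h2), h3, h4⟩)
        · exact Or.inl h1
        · exact absurd h4 h
        · exact Or.inr ⟨kv', h2, h3, h4⟩

-- first-match lookup in an association list with distinct keys
theorem mem_dictGet (l : List (String × List String))
    (hnd : (l.map Prod.fst).Nodup) (x y : String) :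
    y ∈ dictGet l x ↔ ∃ p ∈ l, p.1 = x ∧ y ∈ p.2 := by
  induction l with
  | nil => simp [dictGet]
  | cons p rest ih =>
    obtain ⟨k, v⟩ := p
    rw [List.map_cons, List.nodup_cons] at hnd
    by_cases hx : x = k
    · subst hx
      simp only [dictGet, if_pos, List.mem_cons]
      constructor
      · intro h; exact ⟨(x, v), Or.inl rfl, rfl, h⟩
      · rintro ⟨p', (rfl | h2), h3, h4⟩
        · exact h4
        · have hmm : p'.1 ∈ rest.map Prod.fst := List.mem_map.mpr ⟨p', h2, rfl⟩
          rw [h3] at hmm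
          exact absurd hmm hnd.1
    · simp only [dictGet, if_neg hx, List.mem_cons]
      rw [ih hnd.2]
      constructor
      · rintro ⟨p', h2, h3, h4⟩; exact ⟨p', Or.inr h2, h3, h4⟩
      · rintro ⟨p', (rfl | h2), h3, h4⟩
        · exact absurd h3.symm hx
        · exact ⟨p', h2, h3, h4⟩

theorem suppressedByTable_nodupKeys : (suppressedByTable.map Prod.fst).Nodup := by decide

-- the inverted table records exactly the (suppressor, victim) pairs of the forward tables
set_option maxRecDepth 16384 in
theorem inv_fwd : ∀ p ∈ suppressedByTable, ∀ y ∈ p.2,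
    ∃ kv ∈ modelSuppressesProvider ++ specificSuppressesGeneric, p.1 ∈ kv.2 ∧ y = kv.1 := by
  decide

set_option maxRecDepth 16384 in
theorem inv_bwd : ∀ kv ∈ modelSuppressesProvider ++ specificSuppressesGeneric, ∀ x ∈ kv.2,
    ∃ p ∈ suppressedByTable, p.1 = x ∧ kv.1 ∈ p.2 := by
  decide

theorem corr (x y : String) :
    y ∈ dictGet suppressedByTable x ↔
      ∃ kv ∈ modelSuppressesProvider ++ specificSuppressesGeneric, x ∈ kv.2 ∧ y = kv.1 := by
  rw [mem_dictGet suppressedByTable suppressedByTable_nodupKeys]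
  constructor
  · rintro ⟨p, hp, rfl, hy⟩; exact inv_fwd p hp y hy
  · rintro ⟨kv, hkv, hx, rfl⟩
    obtain ⟨p, hp, hpx, hmem⟩ := inv_bwd kv hkv x hx
    exact ⟨p, hp, hpx, hmem⟩

-- membership in B's single pass over the stack
theorem mem_stackFold (stack : List String) (acc : PySem.Set String) (y : String) :
    y ∈ stack.foldl (fun acc item => PySem.Set.union acc (dictGet suppressedByTable item)) acc ↔
      y ∈ acc ∨ ∃ item ∈ stack, y ∈ dictGet suppressedByTable item := by
  induction stack generalizing acc with
  | nil => simp
  | cons item rest ih =>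
    simp only [List.foldl_cons]
    rw [ih, PySem.Set.mem_union]
    simp only [List.mem_cons]
    constructor
    · rintro ((h1 | h1) | ⟨it, h2, h3⟩)
      · exact Or.inl h1
      · exact Or.inr ⟨item, Or.inl rfl, h1⟩
      · exact Or.inr ⟨it, Or.inr h2, h3⟩
    · rintro (h1 | ⟨it, (rfl | h2), h3⟩)
      · exact Or.inl (Or.inl h1)
      · exact Or.inl (Or.inr h3)
      · exact Or.inr ⟨it, h2, h3⟩

-- pointwise agreement of the two remove sets on elements of the stack
theorem remove_agree (stack : List String) (y : String) (hy : y ∈ stack) :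
    (y ∈ suppressPass stack specificSuppressesGeneric (suppressPass stack modelSuppressesProvider PySem.Set.empty)) ↔
    (y ∈ stack.foldl (fun acc item => PySem.Set.union acc (dictGet suppressedByTable item)) PySem.Set.empty) := by
  rw [mem_stackFold, mem_suppressPass, mem_suppressPass]
  constructor
  · rintro ((h | ⟨kv, hkv, hyk, hc⟩) | ⟨kv, hkv, hyk, hc⟩)
    · exact absurd h (by simp [PySem.Set.empty])
    all_goals {
      simp only [Bool.and_eq_true, List.any_eq_true, List.contains_iff_mem] at hc
      obtain ⟨-, m, hm, hms⟩ := hc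
      right
      exact ⟨m, hms, (corr m y).mpr ⟨kv, by simp [hkv], hm, hyk⟩⟩ }
  · rintro (h | ⟨item, hitem, hmem⟩)
    · exact absurd h (by simp [PySem.Set.empty])
    obtain ⟨kv, hkv, hitemv, hyk⟩ := (corr item y).mp hmem
    have hc : (stack.contains kv.1 && kv.2.any (fun m => stack.contains m)) = true := by
      simp only [Bool.and_eq_true, List.any_eq_true, List.contains_iff_mem]
      exact ⟨hyk ▸ hy, item, hitemv, hitem⟩
    rcases List.mem_append.mp hkv with h1 | h2
    · exact Or.inl (Or.inr ⟨kv, h1, hyk, hc⟩)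
    · exact Or.inr ⟨kv, h2, hyk, hc⟩

-- ===== VERDICT (by name: the statement is the Claim_ definition above) =====
theorem deduplicate_tech_stack_py_spec : Claim_equal_deduplicate_tech_stack_py := by
  intro stack _
  unfold Spec_deduplicate_tech_stack_py deduplicate_tech_stack_py deduplicate_tech_stack_py_alt
  simp only [PySem.Set.diff]
  apply List.filter_congr
  intro y hy
  have h := remove_agree stack y hy
  simp only [PySem.Set.empty] at h
  by_cases hA : y ∈ suppressPass stack specificSuppressesGeneric (suppressPass stack modelSuppressesProvider [])
  · simp [hA, h.mp hA]
  · have hB : y ∉ stack.foldl (fun acc item => PySem.Set.union acc (dictGet suppressedByTable item)) [] :=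
      fun hc => hA (h.mpr hc)
    simp [hA, hB]
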